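-- pv_equiv track=rewrite | github.com/Oraange/advent-of-code | 2024/day21/part1.py | bfs
-- ===== SOURCE A (Python) =====
-- from collections import deque
--
-- dir = {(0, 1): ">", (1, 0): "v", (0, -1): "<", (-1, 0): "^"}
--
-- def bfs(start, pad, pos):
--     r, c = pos[start]
--     q = deque([(r, c, "")])
--     n = len(pad)
--     m = len(pad[0])
--     visited = [[False] * m for _ in range(n)]
--     visited[r][c] = True
--     paths = {}
--
--     while q:
--         x, y, path = q.popleft()
--         current_value = pad[x][y]
--         paths[current_value] = path
--         for (dx, dy), d in dir.items():
--             nx, ny = dx + x, dy + y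
--
--             if (
--                 0 <= nx < n
--                 and 0 <= ny < m
--                 and not visited[nx][ny]
--                 and pad[nx][ny] is not None
--             ):
--                 visited[nx][ny] = True
--                 q.append((nx, ny, path + d))
--
--     return paths
-- ===== SOURCE B (Python) =====
-- DIRS = ((0, 1, ">"), (1, 0, "v"), (0, -1, "<"), (-1, 0, "^"))
--
-- def _inside(h, w, ax, ay):
--     return 0 <= ax < h and 0 <= ay < w
--
-- def bfs(start, pad, pos):
--     # Index-pointer BFS over a growing list (no deque): `queue` doubles as the
--     # dequeue order; each reached cell records (parent cell, direction char)
--     # instead of a cumulative path string, and all strings are rebuilt after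
--     # the traversal in one forward pass over the parent table.
--     sr, sc = pos[start]
--     h, w = len(pad), len(pad[0])
--     seen = [[False] * w for _ in range(h)]
--     seen[sr][sc] = True
--     parents = {(sr, sc): None}   # reached cell -> (parent cell, direction char)
--     queue = [(sr, sc)]
--     head = 0
--     while head < len(queue):
--         cx, cy = queue[head]
--         head += 1
--         for dx, dy, d in DIRS:
--             ax, ay = cx + dx, cy + dy
--             if _inside(h, w, ax, ay) and not seen[ax][ay] and pad[ax][ay] is not None:
--                 seen[ax][ay] = True
--                 parents[(ax, ay)] = ((cx, cy), d)
--                 queue.append((ax, ay))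
--     strs = {}
--     for cell, pv in parents.items():   # parent cells precede their children in insertion order
--         strs[cell] = "" if pv is None else strs[pv[0]] + pv[1]
--     return {pad[cx][cy]: strs[(cx, cy)] for (cx, cy) in queue}
-- ===== Notes on version B (the rewrite author's own statement) =====
-- stated objective: alternative
-- what changed: Instead of a deque carrying a growing path string on every entry, B walks an index pointer over a growing list of bare cells (which doubles as the dequeue order) while a parent dict records each reached cell's predecessor and one direction char; all path strings are rebuilt after the traversal in a single forward pass over the parent table.
-- outside the precondition, e.g. on bfs('s', [['A', None], [None]], {'s': (0, 0)}): A returns {'A': ''}, B returns {'A': ''}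
import Mathlib
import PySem

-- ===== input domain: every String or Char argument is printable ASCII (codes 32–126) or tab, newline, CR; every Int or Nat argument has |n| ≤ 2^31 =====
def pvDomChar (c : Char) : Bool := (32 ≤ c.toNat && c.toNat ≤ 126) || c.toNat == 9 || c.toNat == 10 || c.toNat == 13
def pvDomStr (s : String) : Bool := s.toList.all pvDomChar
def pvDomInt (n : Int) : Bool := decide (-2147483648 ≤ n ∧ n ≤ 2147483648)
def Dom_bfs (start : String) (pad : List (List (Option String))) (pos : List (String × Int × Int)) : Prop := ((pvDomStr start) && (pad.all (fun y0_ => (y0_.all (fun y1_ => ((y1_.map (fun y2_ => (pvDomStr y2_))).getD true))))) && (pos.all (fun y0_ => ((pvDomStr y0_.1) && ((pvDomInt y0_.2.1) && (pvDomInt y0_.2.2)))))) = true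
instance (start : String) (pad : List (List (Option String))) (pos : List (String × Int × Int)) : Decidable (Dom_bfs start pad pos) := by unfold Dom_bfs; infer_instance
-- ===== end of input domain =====

-- B replaces A's deque of (cell, cumulative path string) entries by an index pointer walking a
-- growing list of bare cells (which doubles as the dequeue order) plus a per-cell parent pointer
-- (parent cell and one direction char); all path strings are rebuilt after the traversal in one
-- forward pass over the parent table; objective: alternative (same asymptotic cost here).

-- ===== PORT A =====
-- dir = {(0,1): ">", (1,0): "v", (0,-1): "<", (-1,0): "^"}, iterated via .items() in insertion order
def dirItemsA : List ((Int × Int) × String) := [((0, 1), ">"), ((1, 0), "v"), ((0, -1), "<"), ((-1, 0), "^")]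

-- pad[x][y] with Python's negative-index wraparound (pyGet?); the `.getD` defaults are never
-- consulted inside Pre_ (every access A makes there is in wrap-range)
def padVal (pad : List (List (Option String))) (x y : Int) : Option String :=
  (PySem.List.pyGet? ((PySem.List.pyGet? pad x).getD []) y).getD none

-- visited[x][y] read / write, Python index semantics (wraparound; out-of-range = IndexError,
-- which Pre_ excludes, so the fall-through defaults are never consulted there)
def mget (v : List (List Bool)) (x y : Int) : Bool :=
  (PySem.List.pyGet? ((PySem.List.pyGet? v x).getD []) y).getD false
def mset (v : List (List Bool)) (x y : Int) : List (List Bool) :=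
  match PySem.List.pyIdx? v.length x with
  | none => v
  | some i =>
    match PySem.List.pyIdx? (v.getD i []).length y with
    | none => v
    | some j => v.set i ((v.getD i []).set j true)

-- the body of A's inner `for (dx, dy), d in dir.items():` loop, on state (visited, appended queue entries)
def stepA (pad : List (List (Option String))) (n m x y : Int) (path : String)
    (s : List (List Bool) × List (Int × Int × String)) (dd : (Int × Int) × String) :
    List (List Bool) × List (Int × Int × String) :=
  let nx := dd.1.1 + x
  let ny := dd.1.2 + y
  if 0 ≤ nx ∧ nx < n ∧ 0 ≤ ny ∧ ny < m ∧ mget s.1 nx ny = false ∧ padVal pad nx ny ≠ none then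
    (mset s.1 nx ny, s.2 ++ [(nx, ny, path ++ dd.2)])
  else s

-- the while-loop; fuel only makes it total: inside Pre_ there are at most n*m enqueues, hence
-- at most n*m+1 dequeues, so fuel 5*n*m+10 is never exhausted there
def bfsLoopA (pad : List (List (Option String))) (n m : Int) :
    Nat → List (Int × Int × String) → List (List Bool) → PySem.Dict String String →
      PySem.Dict String String
  | _, [], _, paths => paths
  | 0, _ :: _, _, paths => paths
  | fuel + 1, (x, y, path) :: rest, visited, paths =>
    -- current_value = pad[x][y] is never None inside Pre_, so the `.getD ""` default is never consulted
    let paths1 := paths.insert ((padVal pad x y).getD "") path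
    let s := dirItemsA.foldl (stepA pad n m x y path) (visited, [])
    bfsLoopA pad n m fuel (rest ++ s.2) s.1 paths1

def bfs (start : String) (pad : List (List (Option String))) (pos : List (String × Int × Int)) : List (String × String) :=
  let rc := ((PySem.Dict.mk pos).get? start).getD (0, 0)    -- pos[start]; KeyError excluded by Pre_
  let n : Int := pad.length
  let m : Int := (pad.headD []).length                       -- pad[0]: IndexError on [] excluded by Pre_
  let visited := mset (List.replicate pad.length (List.replicate (pad.headD []).length false)) rc.1 rc.2
  (bfsLoopA pad n m (pad.length * (pad.headD []).length * 5 + 10)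
      [(rc.1, rc.2, "")] visited PySem.Dict.empty).items

-- ===== PORT B =====
-- DIRS = ((0, 1, ">"), (1, 0, "v"), (0, -1, "<"), (-1, 0, "^"))
def dirsB : List (Int × Int × String) := [(0, 1, ">"), (1, 0, "v"), (0, -1, "<"), (-1, 0, "^")]

-- Source B's reads and writes of the seen matrix (Python index semantics, spelled via match on the
-- looked-up row; the fall-through arms are IndexError cases, excluded by Pre_)
-- `0 <= ax < h and 0 <= ay < w` as Source B's _inside helper
def inBounds (h w ax ay : Int) : Bool :=
  decide (0 ≤ ax) && decide (ax < h) && decide (0 ≤ ay) && decide (ay < w)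

def vget (seen : List (List Bool)) (cx cy : Int) : Bool :=
  match PySem.List.pyGet? seen cx with
  | none => false
  | some row => (PySem.List.pyGet? row cy).getD false
def vset (seen : List (List Bool)) (cx cy : Int) : List (List Bool) :=
  match PySem.List.pyIdx? seen.length cx with
  | none => seen
  | some ri => seen.modify ri (fun row =>
      match PySem.List.pyIdx? row.length cy with
      | none => row
      | some ci => row.set ci true)

-- Source B's inner `for dx, dy, d in DIRS:` body on state (seen, parents, queue); fresh cells are
-- appended directly to the queue and their (parent cell, direction char) recorded
def stepB (grid : List (List (Option String))) (h w cx cy : Int)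
    (st : List (List Bool) × PySem.Dict (Int × Int) (Option ((Int × Int) × String)) × List (Int × Int))
    (dir3 : Int × Int × String) :
    List (List Bool) × PySem.Dict (Int × Int) (Option ((Int × Int) × String)) × List (Int × Int) :=
  let ax := cx + dir3.1
  let ay := cy + dir3.2.1
  if inBounds h w ax ay = true ∧ vget st.1 ax ay = false ∧
      (PySem.List.pyGet? ((PySem.List.pyGet? grid ax).getD []) ay).getD none ≠ none then
    (vset st.1 ax ay, st.2.1.insert (ax, ay) (some ((cx, cy), dir3.2.2)), st.2.2 ++ [(ax, ay)])
  else st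

-- Source B's `while head < len(queue):` with the index pointer head; fuel only makes it total (one
-- unit per processed cell, as in port A, and never exhausted inside Pre_; at exhaustion the
-- processed prefix queue.take head is returned — `queue.take head = queue` at the loop's normal exit)
def bfsLoopB (grid : List (List (Option String))) (h w : Int) :
    Nat → List (Int × Int) → Nat → List (List Bool) →
      PySem.Dict (Int × Int) (Option ((Int × Int) × String)) →
      PySem.Dict (Int × Int) (Option ((Int × Int) × String)) × List (Int × Int)
  | 0, queue, head, _, parents => (parents, queue.take head)
  | gas + 1, queue, head, seen, parents =>
    if hq : head < queue.length then
      let st := dirsB.foldl (stepB grid h w queue[head].1 queue[head].2) (seen, parents, queue)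
      bfsLoopB grid h w gas st.2.2 (head + 1) st.1 st.2.1
    else (parents, queue)

-- `for cell, pv in parents.items(): strs[cell] = "" if pv is None else strs[pv[0]] + pv[1]`
-- (parent cells precede their children in insertion order; strs[pv[0]] is always present inside
-- Pre_, so the `.getD ""` default is never consulted)
def buildStrs (parents : PySem.Dict (Int × Int) (Option ((Int × Int) × String))) :
    PySem.Dict (Int × Int) String :=
  parents.items.foldl (fun strs kv =>
    strs.insert kv.1 (match kv.2 with
      | none => ""
      | some pv => strs.getD pv.1 "" ++ pv.2)) PySem.Dict.empty

def bfs_alt (start : String) (pad : List (List (Option String))) (pos : List (String × Int × Int)) : List (String × String) :=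
  let home := ((PySem.Dict.mk pos).get? start).getD (0, 0)    -- pos[start]; KeyError excluded by Pre_
  let sr := home.1
  let sc := home.2
  let done := bfsLoopB pad (pad.length : Int) ((pad.headD []).length : Int)
      (pad.length * (pad.headD []).length * 5 + 10)
      [(sr, sc)] 0
      (vset ((List.range pad.length).map (fun _ => List.replicate (pad.headD []).length false)) sr sc)
      ((PySem.Dict.empty : PySem.Dict (Int × Int) (Option ((Int × Int) × String))).insert
        (sr, sc) none)
  let strs := buildStrs done.1
  (done.2.foldl (fun acc cell =>
      acc.insert (((PySem.List.pyGet? ((PySem.List.pyGet? pad cell.1).getD []) cell.2).getD none).getD "")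
        (strs.getD cell ""))
    (PySem.Dict.empty : PySem.Dict String String)).items

-- ===== PRECONDITION & SPEC =====
-- Pre_ is the set of inputs where A returns a dict[str, str]: start is a key of pos, pad is
-- non-empty, the start coordinates are within Python's wrap-range (else IndexError), every row is
-- at least as long as row 0 (a shorter row raises IndexError as soon as a missing column is
-- probed; the rare reachable short-row layouts where A still returns are excluded with it), and
-- the start cell is not None (there A returns a dict with the non-string key None, which is not a
-- value of the declared return type dict[str, str]).
def Pre_bfs (start : String) (pad : List (List (Option String))) (pos : List (String × Int × Int)) : Prop :=
  ((PySem.Dict.mk pos).get? start).isSome = true ∧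
  pad ≠ [] ∧
  (∀ row ∈ pad, (pad.headD []).length ≤ row.length) ∧
  -(pad.length : Int) ≤ (((PySem.Dict.mk pos).get? start).getD (0, 0)).1 ∧
  (((PySem.Dict.mk pos).get? start).getD (0, 0)).1 < (pad.length : Int) ∧
  -((pad.headD []).length : Int) ≤ (((PySem.Dict.mk pos).get? start).getD (0, 0)).2 ∧
  (((PySem.Dict.mk pos).get? start).getD (0, 0)).2 < ((pad.headD []).length : Int) ∧
  (PySem.List.pyGet?
      ((PySem.List.pyGet? pad (((PySem.Dict.mk pos).get? start).getD (0, 0)).1).getD [])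
      (((PySem.Dict.mk pos).get? start).getD (0, 0)).2).getD none ≠ none
instance (start : String) (pad : List (List (Option String))) (pos : List (String × Int × Int)) : Decidable (Pre_bfs start pad pos) := by unfold Pre_bfs; infer_instance

def pvWitness_bfs : String × List (List (Option String)) × (List (String × Int × Int)) :=
  ("A", [[some "A", some "0"], [none, some "1"]], [("A", (0, 0))])

def Spec_bfs (start : String) (pad : List (List (Option String))) (pos : List (String × Int × Int)) (out : List (String × String)) : Prop := out = bfs_alt start pad pos
instance (start : String) (pad : List (List (Option String))) (pos : List (String × Int × Int)) (out : List (String × String)) : Decidable (Spec_bfs start pad pos out) := by unfold Spec_bfs; infer_instance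

-- ===== CLAIM (what is proved, stated in full; the proofs are below) =====
def Claim_equal_bfs : Prop := ∀ (start : String) (pad : List (List (Option String))) (pos : List (String × Int × Int)), Dom_bfs start pad pos → Pre_bfs start pad pos → Spec_bfs start pad pos (bfs start pad pos)

-- ===== LEMMAS AND PROOFS =====

-- a queue entry of A, reconstructed from B's parent table
def attachStr (parent : PySem.Dict (Int × Int) (Option ((Int × Int) × String))) (c : Int × Int) :
    Int × Int × String := (c.1, c.2, (buildStrs parent).getD c "")

-- Source B's final dict comprehension, as a function of the loop's result
def finalize (pad : List (List (Option String)))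
    (po : PySem.Dict (Int × Int) (Option ((Int × Int) × String)) × List (Int × Int)) :
    PySem.Dict String String :=
  po.2.foldl (fun paths c => paths.insert ((padVal pad c.1 c.2).getD "") ((buildStrs po.1).getD c ""))
    (PySem.Dict.empty : PySem.Dict String String)

def toTriple (t : (Int × Int) × String) : Int × Int × String := (t.1.1, t.1.2, t.2)

lemma dirsB_eq : dirsB = dirItemsA.map toTriple := rfl

lemma pyIdx?_lt {n : Nat} {x : Int} {i : Nat} (h : PySem.List.pyIdx? n x = some i) : i < n := by
  simp only [PySem.List.pyIdx?] at h
  split_ifs at h <;> simp_all <;> omega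

-- B's matrix access is A's spelling of the same Python expression
lemma vget_eq (v : List (List Bool)) (x y : Int) : vget v x y = mget v x y := by
  unfold vget mget
  cases h : PySem.List.pyGet? v x with
  | none =>
    have h0 : PySem.List.pyGet? ([] : List Bool) y = none := by
      simp only [PySem.List.pyGet?, PySem.List.pyIdx?, List.length_nil]
      split_ifs <;> simp_all
    simp [h0]
  | some row => simp

lemma vset_eq (v : List (List Bool)) (x y : Int) : vset v x y = mset v x y := by
  unfold vset mset
  cases h : PySem.List.pyIdx? v.length x with
  | none => rfl
  | some i =>
    have hi : i < v.length := pyIdx?_lt h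
    dsimp only
    rw [List.modify_eq_set]
    have hrow : (v[i]?.getD default) = v.getD i [] := by
      simp [List.getD_eq_getElem?_getD]
      rfl
    rw [hrow]
    cases h2 : PySem.List.pyIdx? (v.getD i []).length y with
    | none =>
      have : v.getD i [] = v[i] := by
        simp [List.getD_eq_getElem?_getD, List.getElem?_eq_getElem hi]
      rw [this, List.set_getElem_self hi]
    | some j => rfl

lemma mget_eq_nonneg (v : List (List Bool)) (x y : Int) (hx : 0 ≤ x) (hy : 0 ≤ y) :
    mget v x y = (v.getD x.toNat []).getD y.toNat false := by
  simp [mget, PySem.List.pyGet?_of_nonneg _ hx, PySem.List.pyGet?_of_nonneg _ hy,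
    List.getD_eq_getElem?_getD]

lemma mset_eq_nonneg (v : List (List Bool)) (x y : Int) (hx : 0 ≤ x) (hy : 0 ≤ y)
    (hxl : x.toNat < v.length) (hyl : y.toNat < (v.getD x.toNat []).length) :
    mset v x y = v.set x.toNat ((v.getD x.toNat []).set y.toNat true) := by
  have h1 : PySem.List.pyIdx? v.length x = some x.toNat := by
    simp only [PySem.List.pyIdx?]
    rw [if_pos hx, if_pos (by omega)]
  have h2 : PySem.List.pyIdx? (v.getD x.toNat []).length y = some y.toNat := by
    simp only [PySem.List.pyIdx?]
    rw [if_pos hy, if_pos (by omega)]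
  unfold mset
  rw [h1]
  dsimp only
  rw [h2]

lemma length_mset (v : List (List Bool)) (x y : Int) : (mset v x y).length = v.length := by
  unfold mset
  split
  · rfl
  · split
    · rfl
    · simp

lemma rows_mset (v : List (List Bool)) (x y : Int) (m : Int)
    (h : ∀ row ∈ v, (row.length : Int) = m) :
    ∀ row ∈ mset v x y, (row.length : Int) = m := by
  intro row hr
  unfold mset at hr
  split at hr
  · exact h row hr
  · rename_i i hi
    split at hr
    · exact h row hr
    · rcases List.mem_or_eq_of_mem_set hr with h1 | h1
      · exact h row h1
      · subst h1
        have hlt : i < v.length := pyIdx?_lt hi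
        simp only [List.length_set]
        have hmem : v.getD i [] ∈ v := by
          rw [List.getD_eq_getElem?_getD, List.getElem?_eq_getElem hlt]
          exact List.getElem_mem hlt
        exact h _ hmem

lemma mget_mset_self (v : List (List Bool)) (x y : Int) (hx : 0 ≤ x) (hy : 0 ≤ y)
    (hxl : x.toNat < v.length) (hyl : y.toNat < (v.getD x.toNat []).length) :
    mget (mset v x y) x y = true := by
  rw [mset_eq_nonneg v x y hx hy hxl hyl, mget_eq_nonneg _ _ _ hx hy]
  simp only [List.getD_eq_getElem?_getD]
  rw [List.getElem?_set_self (by simpa using hxl)]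
  simp only [Option.getD_some]
  rw [List.getElem?_set_self (by simpa using hyl)]
  rfl

lemma mget_mset_ne (v : List (List Bool)) (x y a b : Int)
    (hx : 0 ≤ x) (hy : 0 ≤ y) (ha : 0 ≤ a) (hb : 0 ≤ b)
    (hxl : x.toNat < v.length) (hyl : y.toNat < (v.getD x.toNat []).length)
    (hne : ¬ (a = x ∧ b = y)) :
    mget (mset v x y) a b = mget v a b := by
  rw [mset_eq_nonneg v x y hx hy hxl hyl, mget_eq_nonneg _ _ _ ha hb,
    mget_eq_nonneg _ _ _ ha hb]
  simp only [List.getD_eq_getElem?_getD]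
  by_cases hax : a = x
  · subst hax
    have hby : b.toNat ≠ y.toNat := by omega
    rw [List.getElem?_set_self (by simpa using hxl)]
    simp only [Option.getD_some]
    rw [List.getElem?_set_ne (by omega)]
  · rw [List.getElem?_set_ne (by omega)]

lemma buildStrs_insert_fresh (parent : PySem.Dict (Int × Int) (Option ((Int × Int) × String)))
    (k : Int × Int) (v : Option ((Int × Int) × String)) (h : parent.contains k = false) :
    buildStrs (parent.insert k v)
      = (buildStrs parent).insert k (match v with
          | none => ""
          | some pd => (buildStrs parent).getD pd.1 "" ++ pd.2) := by
  unfold buildStrs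
  rw [PySem.Dict.items_insert_of_not_contains (h := h), List.foldl_append]
  rfl

-- every key already present keeps its reconstructed string when the table grows by fresh keys
def PExt (p p' : PySem.Dict (Int × Int) (Option ((Int × Int) × String))) : Prop :=
  ∀ c, p.contains c = true → p'.contains c = true ∧ (buildStrs p').getD c "" = (buildStrs p).getD c ""

lemma pext_refl (p : PySem.Dict (Int × Int) (Option ((Int × Int) × String))) : PExt p p := by
  intro c h; exact ⟨h, rfl⟩

lemma pext_trans {p q r : PySem.Dict (Int × Int) (Option ((Int × Int) × String))}
    (h1 : PExt p q) (h2 : PExt q r) : PExt p r := by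
  intro c h
  obtain ⟨h1c, h1s⟩ := h1 c h
  obtain ⟨h2c, h2s⟩ := h2 c h1c
  exact ⟨h2c, h2s.trans h1s⟩

lemma pext_insert_fresh (p : PySem.Dict (Int × Int) (Option ((Int × Int) × String)))
    (k : Int × Int) (v : Option ((Int × Int) × String)) (h : p.contains k = false) :
    PExt p (p.insert k v) := by
  intro c hc
  have hck : c ≠ k := by rintro rfl; rw [hc] at h; cases h
  constructor
  · rw [PySem.Dict.contains_insert, hc]
    simp
  · rw [buildStrs_insert_fresh _ _ _ h, PySem.Dict.getD_insert_of_ne _ _ _ hck]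

-- the relation maintained between A's and B's neighbour folds while expanding cell (x, y):
-- B's queue q is q0 (the frozen queue at dequeue time) plus the cells A has appended
def StateRel (n m x y : Int) (path : String) (q0 : List (Int × Int))
    (sA : List (List Bool) × List (Int × Int × String))
    (sB : List (List Bool) × PySem.Dict (Int × Int) (Option ((Int × Int) × String)) × List (Int × Int)) : Prop :=
  sB.1 = sA.1 ∧
  (sA.1.length : Int) = n ∧
  (∀ row ∈ sA.1, (row.length : Int) = m) ∧
  q0.length ≤ sB.2.2.length ∧
  sB.2.2.take q0.length = q0 ∧
  sA.2 = (sB.2.2.drop q0.length).map (attachStr sB.2.1) ∧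
  (∀ c ∈ sB.2.2, sB.2.1.contains c = true) ∧
  sB.2.1.contains (x, y) = true ∧
  (buildStrs sB.2.1).getD (x, y) "" = path ∧
  (∀ a b : Int, 0 ≤ a → a < n → 0 ≤ b → b < m →
    sB.2.1.contains (a, b) = true → mget sA.1 a b = true) ∧
  sB.2.1.keys.Nodup

-- one direction step preserves the relation and only adds fresh keys
lemma step_rel (pad : List (List (Option String))) (n m x y : Int) (path : String)
    (q0 : List (Int × Int))
    (sA : List (List Bool) × List (Int × Int × String))
    (sB : List (List Bool) × PySem.Dict (Int × Int) (Option ((Int × Int) × String)) × List (Int × Int))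
    (t : (Int × Int) × String) (h : StateRel n m x y path q0 sA sB) :
    StateRel n m x y path q0 (stepA pad n m x y path sA t) (stepB pad n m x y sB (toTriple t))
      ∧ PExt sB.2.1 (stepB pad n m x y sB (toTriple t)).2.1 := by
  obtain ⟨hv, h1, h2, h3, h4, h5, h6, h7, h8, h9, h10⟩ := h
  unfold stepA stepB toTriple
  dsimp only
  rw [hv, vget_eq]
  have e1 : x + t.1.1 = t.1.1 + x := Int.add_comm _ _
  have e2 : y + t.1.2 = t.1.2 + y := Int.add_comm _ _
  rw [e1, e2]
  have hpv : (PySem.List.pyGet? ((PySem.List.pyGet? pad (t.1.1 + x)).getD []) (t.1.2 + y)).getD none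
      = padVal pad (t.1.1 + x) (t.1.2 + y) := rfl
  rw [hpv, vset_eq]
  have hiff : (inBounds n m (t.1.1 + x) (t.1.2 + y) = true ∧
        mget sA.1 (t.1.1 + x) (t.1.2 + y) = false ∧
        padVal pad (t.1.1 + x) (t.1.2 + y) ≠ none)
      ↔ (0 ≤ t.1.1 + x ∧ t.1.1 + x < n ∧ 0 ≤ t.1.2 + y ∧ t.1.2 + y < m ∧
        mget sA.1 (t.1.1 + x) (t.1.2 + y) = false ∧
        padVal pad (t.1.1 + x) (t.1.2 + y) ≠ none) := by
    simp only [inBounds, Bool.and_eq_true, decide_eq_true_eq]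
    tauto
  rw [if_congr hiff rfl rfl]
  by_cases hcond : 0 ≤ t.1.1 + x ∧ t.1.1 + x < n ∧ 0 ≤ t.1.2 + y ∧ t.1.2 + y < m ∧
      mget sA.1 (t.1.1 + x) (t.1.2 + y) = false ∧ padVal pad (t.1.1 + x) (t.1.2 + y) ≠ none
  · obtain ⟨hc1, hc2, hc3, hc4, hc5, hc6⟩ := hcond
    rw [if_pos ⟨hc1, hc2, hc3, hc4, hc5, hc6⟩, if_pos ⟨hc1, hc2, hc3, hc4, hc5, hc6⟩]
    have hlen : (t.1.1 + x).toNat < sA.1.length := by omega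
    have hmemrow : sA.1.getD (t.1.1 + x).toNat [] ∈ sA.1 := by
      rw [List.getD_eq_getElem?_getD, List.getElem?_eq_getElem hlen]
      exact List.getElem_mem hlen
    have hrowlen : ((sA.1.getD (t.1.1 + x).toNat []).length : Int) = m := h2 _ hmemrow
    have hylen : (t.1.2 + y).toNat < (sA.1.getD (t.1.1 + x).toNat []).length := by omega
    have hfresh : sB.2.1.contains (t.1.1 + x, t.1.2 + y) = false := by
      rcases Bool.eq_false_or_eq_true (sB.2.1.contains (t.1.1 + x, t.1.2 + y)) with h' | h'
      · rw [h9 _ _ hc1 hc2 hc3 hc4 h'] at hc5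
        cases hc5
      · exact h'
    have hext := pext_insert_fresh sB.2.1 (t.1.1 + x, t.1.2 + y) (some ((x, y), t.2)) hfresh
    have hbs : buildStrs (sB.2.1.insert (t.1.1 + x, t.1.2 + y) (some ((x, y), t.2)))
        = (buildStrs sB.2.1).insert (t.1.1 + x, t.1.2 + y) ((buildStrs sB.2.1).getD (x, y) "" ++ t.2) :=
      buildStrs_insert_fresh _ _ _ hfresh
    refine ⟨⟨rfl, ?_, ?_, ?_, ?_, ?_, ?_, ?_, ?_, ?_, ?_⟩, hext⟩
    · rw [length_mset]; exact h1
    · exact rows_mset _ _ _ _ h2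
    · dsimp only
      rw [List.length_append]
      omega
    · dsimp only
      rw [List.take_append_of_le_length h3]
      exact h4
    · dsimp only
      rw [List.drop_append_of_le_length h3, List.map_append, h5]
      congr 1
      · exact List.map_congr_left (fun c hc => by
          unfold attachStr
          rw [(hext c (h6 c (List.mem_of_mem_drop hc))).2])
      · simp [attachStr, hbs, PySem.Dict.getD_insert_self, h8]
    · intro c hc
      rcases List.mem_append.mp hc with hc' | hc'
      · exact (hext c (h6 c hc')).1
      · simp only [List.mem_singleton] at hc'
        subst hc'
        exact PySem.Dict.contains_insert_self _ _ _
    · exact (hext _ h7).1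
    · rw [(hext _ h7).2]; exact h8
    · intro a b ha han hb hbm hcont
      by_cases hab : a = t.1.1 + x ∧ b = t.1.2 + y
      · obtain ⟨rfl, rfl⟩ := hab
        exact mget_mset_self _ _ _ hc1 hc3 hlen hylen
      · rw [mget_mset_ne _ _ _ _ _ hc1 hc3 ha hb hlen hylen hab]
        apply h9 a b ha han hb hbm
        rw [PySem.Dict.contains_insert] at hcont
        rcases Bool.or_eq_true_iff.mp hcont with h' | h'
        · exfalso
          have := eq_of_beq h'
          rw [Prod.mk.injEq] at this
          exact hab this
        · exact h'
    · exact PySem.Dict.nodup_keys_insert _ _ _ h10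
  · rw [if_neg hcond, if_neg hcond]
    exact ⟨⟨hv, h1, h2, h3, h4, h5, h6, h7, h8, h9, h10⟩, pext_refl _⟩

-- the whole 4-direction fold preserves the relation
lemma fold_rel (pad : List (List (Option String))) (n m x y : Int) (path : String)
    (q0 : List (Int × Int)) :
    ∀ (dirs : List ((Int × Int) × String))
      (sA : List (List Bool) × List (Int × Int × String))
      (sB : List (List Bool) × PySem.Dict (Int × Int) (Option ((Int × Int) × String)) × List (Int × Int)),
      StateRel n m x y path q0 sA sB →
      StateRel n m x y path q0 (dirs.foldl (stepA pad n m x y path) sA)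
        ((dirs.map toTriple).foldl (stepB pad n m x y) sB)
      ∧ PExt sB.2.1 ((dirs.map toTriple).foldl (stepB pad n m x y) sB).2.1 := by
  intro dirs
  induction dirs with
  | nil => intro sA sB h; exact ⟨h, pext_refl _⟩
  | cons t ts ih =>
    intro sA sB h
    obtain ⟨h1, he1⟩ := step_rel pad n m x y path q0 sA sB t h
    obtain ⟨h2, he2⟩ := ih _ _ h1
    exact ⟨h2, pext_trans he1 he2⟩

-- the two loops, run in lockstep (one fuel unit per processed cell), produce the same paths dict
lemma loop_eq (pad : List (List (Option String))) (n m : Int) :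
    ∀ (fuel : Nat) (qB : List (Int × Int)) (i : Nat)
      (parent : PySem.Dict (Int × Int) (Option ((Int × Int) × String)))
      (visited : List (List Bool)) (paths : PySem.Dict String String),
      i ≤ qB.length →
      (visited.length : Int) = n →
      (∀ row ∈ visited, (row.length : Int) = m) →
      (∀ a b : Int, 0 ≤ a → a < n → 0 ≤ b → b < m →
        parent.contains (a, b) = true → mget visited a b = true) →
      (∀ c ∈ qB, parent.contains c = true) →
      parent.keys.Nodup →
      paths = (qB.take i).foldl (fun ps c =>
        ps.insert ((padVal pad c.1 c.2).getD "") ((buildStrs parent).getD c ""))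
        (PySem.Dict.empty : PySem.Dict String String) →
      bfsLoopA pad n m fuel ((qB.drop i).map (attachStr parent)) visited paths
        = finalize pad (bfsLoopB pad n m fuel qB i visited parent) := by
  intro fuel
  induction fuel with
  | zero =>
    intro qB i parent visited paths hi h1 h2 h3 hq hnd he
    have hA : bfsLoopA pad n m 0 ((qB.drop i).map (attachStr parent)) visited paths = paths := by
      cases hdq : (qB.drop i).map (attachStr parent) with
      | nil => simp [bfsLoopA]
      | cons a l =>
        obtain ⟨ax, ay, ap⟩ := a
        simp [bfsLoopA]
    rw [hA]
    simp only [bfsLoopB, finalize]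
    exact he
  | succ fuel ih =>
    intro qB i parent visited paths hi h1 h2 h3 hq hnd he
    by_cases hlt : i < qB.length
    · -- dequeue qB[i]
      rw [List.drop_eq_getElem_cons hlt, List.map_cons]
      have hattach : attachStr parent qB[i]
          = (qB[i].1, qB[i].2, (buildStrs parent).getD qB[i] "") := rfl
      rw [hattach]
      show bfsLoopA pad n m (fuel + 1)
          ((qB[i].1, qB[i].2, (buildStrs parent).getD qB[i] "") ::
            (qB.drop (i + 1)).map (attachStr parent)) visited paths = _
      simp only [bfsLoopA, bfsLoopB]
      rw [dif_pos hlt]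
      rw [dirsB_eq]
      obtain ⟨hrel, hext⟩ := fold_rel pad n m qB[i].1 qB[i].2 ((buildStrs parent).getD qB[i] "")
        qB dirItemsA (visited, []) (visited, parent, qB)
        ⟨rfl, h1, h2, le_refl _, by simp, by simp, hq,
          by simpa using hq qB[i] (List.getElem_mem hlt),
          rfl, fun a b ha han hb hbm hc => h3 a b ha han hb hbm hc, hnd⟩
      obtain ⟨g0, g1, g2, g3, g4, g5, g6, g7, g8, g9, g10⟩ := hrel
      set sA := dirItemsA.foldl (stepA pad n m qB[i].1 qB[i].2 ((buildStrs parent).getD qB[i] "")) (visited, [])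
        with hsA
      set sB := (dirItemsA.map toTriple).foldl (stepB pad n m qB[i].1 qB[i].2) (visited, parent, qB)
        with hsB
      -- B's queue after the fold is qB plus the freshly appended cells
      have hq' : sB.2.2 = qB ++ sB.2.2.drop qB.length := by
        conv_lhs => rw [← List.take_append_drop qB.length sB.2.2]
        rw [g4]
      -- A's queue for the next round is B's queue past position i+1, reconstructed
      have hqueue : (qB.drop (i + 1)).map (attachStr parent) ++ sA.2
          = (sB.2.2.drop (i + 1)).map (attachStr sB.2.1) := by
        conv_rhs => rw [hq', List.drop_append_of_le_length (by omega), List.map_append, ← g5]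
        congr 1
        exact (List.map_congr_left (fun c hc => by
          unfold attachStr
          rw [(hext c (hq c (List.mem_of_mem_drop hc))).2])).symm
      rw [hqueue, ← g0]
      apply ih sB.2.2 (i + 1) sB.2.1 sB.1
      · omega
      · rw [g0]; exact g1
      · rw [g0]; exact g2
      · intro a b ha han hb hbm hc
        rw [g0]
        exact g9 a b ha han hb hbm hc
      · exact g6
      · exact g10
      · -- paths after this round = reconstruction fold over the processed prefix q.take (i+1)
        have htk : sB.2.2.take (i + 1) = qB.take (i + 1) := by
          conv_lhs => rw [hq', List.take_append_of_le_length (by omega)]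
        rw [htk, List.take_add_one, List.getElem?_eq_getElem hlt]
        simp only [Option.toList_some, List.foldl_append, List.foldl_cons, List.foldl_nil]
        have hfold : (qB.take i).foldl (fun ps c =>
              ps.insert ((padVal pad c.1 c.2).getD "") ((buildStrs sB.2.1).getD c ""))
              (PySem.Dict.empty : PySem.Dict String String) = paths := by
          rw [he]
          apply PySem.List.foldl_congr_mem
          intro acc c hc
          dsimp only
          rw [(hext c (hq c (List.mem_of_mem_take hc))).2]
        rw [hfold, (hext _ (hq _ (List.getElem_mem hlt))).2]
    · -- i = qB.length: both loops stop
      have hieq : i = qB.length := by omega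
      have hdq : qB.drop i = [] := by
        rw [hieq, List.drop_length]
      rw [hdq, List.map_nil]
      have hA : bfsLoopA pad n m (fuel + 1) [] visited paths = paths := by
        simp [bfsLoopA]
      rw [hA]
      simp only [bfsLoopB]
      rw [dif_neg hlt]
      simp only [finalize]
      rw [he, hieq, List.take_length]

-- ===== VERDICT (by name: the statement is the Claim_ definition above) =====
theorem bfs_spec : Claim_equal_bfs := by
  intro start pad pos _ hpre
  obtain ⟨hs, hnil, hrect, hrl, hrn, hcl, hcm, hsv⟩ := hpre
  show bfs start pad pos = bfs_alt start pad pos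
  unfold bfs bfs_alt
  dsimp only
  rw [vset_eq]
  set rc := ((PySem.Dict.mk pos).get? start).getD (0, 0) with hrcdef
  set parent0 := ((PySem.Dict.empty : PySem.Dict (Int × Int) (Option ((Int × Int) × String))).insert
    (rc.1, rc.2) none) with hp0
  have hbs0 : buildStrs parent0 = (buildStrs PySem.Dict.empty).insert (rc.1, rc.2) "" :=
    buildStrs_insert_fresh _ _ _ (PySem.Dict.contains_empty _)
  have hinit : [((rc.1 : Int), (rc.2 : Int), ("" : String))]
      = (([(rc.1, rc.2)].drop 0).map (attachStr parent0)) := by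
    simp [attachStr, hbs0, PySem.Dict.getD_insert_self]
  rw [hinit]
  have hvis0 : (List.range pad.length).map (fun _ => List.replicate (pad.headD []).length false)
      = List.replicate pad.length (List.replicate (pad.headD []).length false) := by
    simp [List.map_const']
  rw [hvis0]
  rw [loop_eq pad (pad.length : Int) ((pad.headD []).length : Int)
    (pad.length * (pad.headD []).length * 5 + 10) [(rc.1, rc.2)] 0 parent0
    (mset (List.replicate pad.length (List.replicate (pad.headD []).length false)) rc.1 rc.2)
    PySem.Dict.empty (Nat.zero_le _) ?_ ?_ ?_ ?_ ?_ rfl]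
  · rfl
  · rw [length_mset]; simp
  · refine rows_mset _ _ _ _ (fun row hrow => ?_)
    rw [List.eq_of_mem_replicate hrow]
    simp
  · intro a b ha han hb hbm hcont
    rw [hp0, PySem.Dict.contains_insert, PySem.Dict.contains_empty, Bool.or_false] at hcont
    have hab : (a, b) = (rc.1, rc.2) := eq_of_beq hcont
    rw [Prod.mk.injEq] at hab
    obtain ⟨rfl, rfl⟩ := hab
    have hlen : rc.1.toNat < (List.replicate pad.length
        (List.replicate (pad.headD []).length false)).length := by
      rw [List.length_replicate]
      omega
    have hrow : (List.replicate pad.length (List.replicate (pad.headD []).length false)).getD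
        rc.1.toNat [] = List.replicate (pad.headD []).length false := by
      rw [List.getD_eq_getElem?_getD, List.getElem?_replicate]
      simp [(by simpa using hlen : rc.1.toNat < pad.length)]
    exact mget_mset_self _ _ _ ha hb hlen (by rw [hrow, List.length_replicate]; omega)
  · intro c hc
    simp only [List.mem_singleton] at hc
    subst hc
    exact PySem.Dict.contains_insert_self _ _ _
  · exact PySem.Dict.nodup_keys_insert _ _ _ PySem.Dict.nodup_keys_empty
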